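-- pv_equiv track=rewrite | github.com/Draifor/python | Listas/Registro_Pasajeros_Funciones.py | quantPassengCountry
-- ===== SOURCE A (Python) =====
-- def quantPassengCountry(passengers, countries, country):
--     # Recibe una lista de pasajeros, una de países y un país. Retorna la cantidad de
--     # pasajeros que viajan a ese país.
--     count = 0
--     for i in countries:
--         if i[1] == country:
--             for person in passengers:
--                 if person[2] == i[0]:
--                     count += 1
--     return count
-- ===== SOURCE B (Python) =====
-- def quantPassengCountry(passengers, countries, country):
--     # Count ids of matching country rows once (with multiplicity), then one pass
--     # over passengers summing the multiplicities.
--     ids = {}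
--     for i in countries:
--         if i[1] == country:
--             ids[i[0]] = ids.get(i[0], 0) + 1
--     if not ids:
--         return 0
--     count = 0
--     for person in passengers:
--         count += ids.get(person[2], 0)
--     return count
-- ===== Notes on version B (the rewrite author's own statement) =====
-- stated objective: alternative
-- what changed: Instead of rescanning all passengers for every matching country row, B builds a dict of matching country ids with multiplicity in one pass over countries and then sums multiplicities in a single pass over passengers (O(C+P) vs O(C*P); a timing run's inputs have few country rows, so no measured speed-up).
import Mathlib
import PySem

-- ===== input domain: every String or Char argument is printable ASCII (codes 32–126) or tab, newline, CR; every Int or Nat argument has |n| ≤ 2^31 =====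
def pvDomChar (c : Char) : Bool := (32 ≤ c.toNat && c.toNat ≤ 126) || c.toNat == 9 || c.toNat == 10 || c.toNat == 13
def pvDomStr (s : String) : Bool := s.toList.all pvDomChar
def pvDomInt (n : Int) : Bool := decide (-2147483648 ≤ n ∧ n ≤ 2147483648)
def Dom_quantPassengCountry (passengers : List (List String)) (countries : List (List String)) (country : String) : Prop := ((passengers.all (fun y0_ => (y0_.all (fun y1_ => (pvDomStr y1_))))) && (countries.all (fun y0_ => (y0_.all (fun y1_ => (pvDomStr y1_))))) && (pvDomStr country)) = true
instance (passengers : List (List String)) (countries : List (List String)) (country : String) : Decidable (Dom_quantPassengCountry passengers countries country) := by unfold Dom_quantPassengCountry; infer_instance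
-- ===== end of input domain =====

-- B replaces A's rescan of all passengers per matching country row by a one-pass
-- multiplicity dict over countries followed by a single pass over passengers (objective: alternative).


-- ===== PORT A =====
-- i[1], i[0], person[2] are ported with pyGetD; Pre_ below keeps exactly the inputs
-- where the Python indexing cannot raise.
def quantPassengCountry (passengers : List (List String)) (countries : List (List String)) (country : String) : Int :=
  countries.foldl (fun count i =>
    if PySem.List.pyGetD i 1 "" == country then
      passengers.foldl (fun c person =>
        if PySem.List.pyGetD person 2 "" == PySem.List.pyGetD i 0 "" then c + 1 else c) count
    else count) 0

-- ===== PORT B =====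
-- Source B's `ids` dict: multiplicity of each id among the country rows naming `country`
def pvCounterB (countries : List (List String)) (country : String) : PySem.Dict String Int :=
  countries.foldl (fun d i =>
    if PySem.List.pyGetD i 1 "" == country then
      d.insert (PySem.List.pyGetD i 0 "") (d.getD (PySem.List.pyGetD i 0 "") 0 + 1)
    else d) PySem.Dict.empty

def quantPassengCountry_alt (passengers : List (List String)) (countries : List (List String)) (country : String) : Int :=
  if (pvCounterB countries country).size = 0 then 0
  else passengers.foldl (fun count person =>
    count + (pvCounterB countries country).getD (PySem.List.pyGetD person 2 "") 0) 0

-- ===== PRECONDITION & SPEC =====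
-- Pre_ excludes exactly the inputs where the Python A raises IndexError: a country row
-- shorter than 2 (i[1] is read for every row), or — when some country row matches —
-- a passenger shorter than 3 (person[2] is then read for every passenger).
def Pre_quantPassengCountry (passengers : List (List String)) (countries : List (List String)) (country : String) : Prop :=
  (∀ c ∈ countries, 2 ≤ c.length) ∧
  ((∃ c ∈ countries, c.getD 1 "" = country) → ∀ p ∈ passengers, 3 ≤ p.length)
instance (passengers : List (List String)) (countries : List (List String)) (country : String) : Decidable (Pre_quantPassengCountry passengers countries country) := by unfold Pre_quantPassengCountry; infer_instance
def pvWitness_quantPassengCountry : List (List String) × List (List String) × String :=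
  ([["Ana", "31", "co1"], ["Bob", "40", "co2"]], [["co1", "Chile"], ["co2", "Peru"]], "Chile")

def Spec_quantPassengCountry (passengers : List (List String)) (countries : List (List String)) (country : String) (out : Int) : Prop := out = quantPassengCountry_alt passengers countries country
instance (passengers : List (List String)) (countries : List (List String)) (country : String) (out : Int) : Decidable (Spec_quantPassengCountry passengers countries country out) := by unfold Spec_quantPassengCountry; infer_instance

-- ===== CLAIM (what is proved, stated in full; the proofs are below) =====
def Claim_equal_quantPassengCountry : Prop := ∀ (passengers : List (List String)) (countries : List (List String)) (country : String), Dom_quantPassengCountry passengers countries country → Pre_quantPassengCountry passengers countries country → Spec_quantPassengCountry passengers countries country (quantPassengCountry passengers countries country)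

-- ===== LEMMAS AND PROOFS =====

-- the (multi)list of ids of the country rows naming `country`
def pvIds (countries : List (List String)) (country : String) : List String :=
  (countries.filter (fun i => PySem.List.pyGetD i 1 "" == country)).map
    (fun i => PySem.List.pyGetD i 0 "")

lemma pvIds_cons_pos (i : List String) (cs : List (List String)) (country : String)
    (h : PySem.List.pyGetD i 1 "" = country) :
    pvIds (i :: cs) country = PySem.List.pyGetD i 0 "" :: pvIds cs country := by
  simp [pvIds, h]

lemma pvIds_cons_neg (i : List String) (cs : List (List String)) (country : String)
    (h : ¬ PySem.List.pyGetD i 1 "" = country) :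
    pvIds (i :: cs) country = pvIds cs country := by
  simp [pvIds, h]

-- A's nested loop totals, per matching id, the passengers bound for it.
lemma pvA_eq_sum (passengers countries : List (List String)) (country : String) :
    ∀ acc : Int,
      countries.foldl (fun count i =>
        if PySem.List.pyGetD i 1 "" == country then
          passengers.foldl (fun c person =>
            if PySem.List.pyGetD person 2 "" == PySem.List.pyGetD i 0 "" then c + 1 else c) count
        else count) acc
      = acc + ((pvIds countries country).map
          (fun x => (passengers.countP (fun person => PySem.List.pyGetD person 2 "" == x) : Int))).sum := by
  induction countries with
  | nil => intro acc; simp [pvIds]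
  | cons i cs ih =>
    intro acc
    rw [List.foldl_cons]
    by_cases h : PySem.List.pyGetD i 1 "" = country
    · rw [if_pos (by simpa using h),
        PySem.List.foldl_if_add_one (fun person => PySem.List.pyGetD person 2 "" == PySem.List.pyGetD i 0 "") passengers acc,
        ih, pvIds_cons_pos i cs country h]
      simp; ring
    · rw [if_neg (by simpa using h), ih, pvIds_cons_neg i cs country h]

-- Source B's conditional dict-building loop over countries IS the counter loop over the id list
lemma pvFold_filter_map (country : String) :
    ∀ (countries : List (List String)) (d : PySem.Dict String Int),
      countries.foldl (fun d i =>
        if PySem.List.pyGetD i 1 "" == country then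
          d.insert (PySem.List.pyGetD i 0 "") (d.getD (PySem.List.pyGetD i 0 "") 0 + 1)
        else d) d
      = (pvIds countries country).foldl (fun d x => d.insert x (d.getD x 0 + 1)) d := by
  intro countries
  induction countries with
  | nil => intro d; simp [pvIds]
  | cons i cs ih =>
    intro d
    rw [List.foldl_cons]
    by_cases h : PySem.List.pyGetD i 1 "" = country
    · rw [if_pos (by simpa using h), ih, pvIds_cons_pos i cs country h, List.foldl_cons]
    · rw [if_neg (by simpa using h), ih, pvIds_cons_neg i cs country h]

-- Fubini: summing, per passenger, its id's multiplicity in L equals summing, per id in L,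
-- the number of passengers bound for it.
lemma pvSum_comm (passengers : List (List String)) :
    ∀ L : List String,
      (passengers.map (fun person => (L.count (PySem.List.pyGetD person 2 "") : Int))).sum
      = (L.map (fun x => (passengers.countP (fun person => PySem.List.pyGetD person 2 "" == x) : Int))).sum := by
  intro L
  induction L with
  | nil => simp
  | cons x L ih =>
    have hsplit : ∀ person : List String,
        ((x :: L).count (PySem.List.pyGetD person 2 "") : Int)
        = (if PySem.List.pyGetD person 2 "" == x then 1 else 0) + (L.count (PySem.List.pyGetD person 2 "") : Int) := by
      intro person
      by_cases h : PySem.List.pyGetD person 2 "" = x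
      · simp [h]; omega
      · simp [h, Ne.symm h]
    calc (passengers.map (fun person => ((x :: L).count (PySem.List.pyGetD person 2 "") : Int))).sum
        = (passengers.map (fun person =>
            (if PySem.List.pyGetD person 2 "" == x then (1:Int) else 0) + (L.count (PySem.List.pyGetD person 2 "") : Int))).sum := by
          simp only [hsplit]
      _ = (passengers.map (fun person => if PySem.List.pyGetD person 2 "" == x then (1:Int) else 0)).sum
          + (passengers.map (fun person => (L.count (PySem.List.pyGetD person 2 "") : Int))).sum := by
          rw [← List.sum_map_add]
      _ = (passengers.countP (fun person => PySem.List.pyGetD person 2 "" == x) : Int)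
          + ((L.map (fun x => (passengers.countP (fun person => PySem.List.pyGetD person 2 "" == x) : Int))).sum) := by
          rw [ih, PySem.List.sum_map_ite_one_zero]
      _ = _ := by simp

-- B's dict is the counter of pvIds
lemma pvCounterB_eq (countries : List (List String)) (country : String) :
    pvCounterB countries country = PySem.Dict.counter (pvIds countries country) := by
  unfold pvCounterB
  rw [pvFold_filter_map country countries PySem.Dict.empty,
    PySem.Dict.foldl_insert_getD_add_one_eq_counter]

-- ===== VERDICT (by name: the statement is the Claim_ definition above) =====
theorem quantPassengCountry_spec : Claim_equal_quantPassengCountry := by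
  intro passengers countries country _ _
  unfold Spec_quantPassengCountry quantPassengCountry quantPassengCountry_alt
  rw [pvA_eq_sum passengers countries country 0, zero_add, pvCounterB_eq]
  by_cases hL : pvIds countries country = []
  · rw [hL]; simp
  · have hsz : (PySem.Dict.counter (pvIds countries country)).size ≠ 0 := by
      obtain ⟨x, L, hxL⟩ := List.exists_cons_of_ne_nil hL
      rw [hxL]
      have hk : ((PySem.Dict.counter (x :: L)).keys : List String) ≠ [] := by
        have : x ∈ (PySem.Dict.counter (x :: L)).keys := by
          rw [PySem.Dict.keys_counter]; simp [pysem]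
        exact List.ne_nil_of_mem this
      simpa [PySem.Dict.size, PySem.Dict.keys, List.length_eq_zero_iff] using hk
    rw [if_neg hsz,
      PySem.List.foldl_add passengers
        (fun person => (PySem.Dict.counter (pvIds countries country)).getD (PySem.List.pyGetD person 2 "") 0) 0,
      zero_add]
    simp only [PySem.Dict.getD_counter]
    exact (pvSum_comm passengers (pvIds countries country)).symm
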